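-- pv_equiv track=rewrite | github.com/PanJanke/AdventOfCode2025 | day10/day10p2.py | button_base_creator
-- ===== SOURCE A (Python) =====
-- def button_base_creator(buttons):
--     button_base = {}
--     for b in buttons:
--         for l in b:
--             if l not in button_base:
--                 button_base[l] = []
--             button_base[l].append(tuple(b))
--     return button_base
-- ===== SOURCE B (Python) =====
-- def button_base_creator(buttons):
--     # Two-pass re-implementation: first discover the distinct letters in
--     # first-occurrence order, then build each group by a per-letter scan.
--     seen = []
--     for b in buttons:
--         for l in b:
--             if l not in seen:
--                 seen.append(l)
--     return {l: [tuple(b) for b in buttons for c in b if c == l] for l in seen}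
-- ===== Notes on version B (the rewrite author's own statement) =====
-- stated objective: alternative
-- what changed: Replaces A's single online dict-insertion pass with a two-pass scheme: first collect the distinct letters in first-occurrence order, then build each letter's group by an independent scan over all buttons.
import Mathlib
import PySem

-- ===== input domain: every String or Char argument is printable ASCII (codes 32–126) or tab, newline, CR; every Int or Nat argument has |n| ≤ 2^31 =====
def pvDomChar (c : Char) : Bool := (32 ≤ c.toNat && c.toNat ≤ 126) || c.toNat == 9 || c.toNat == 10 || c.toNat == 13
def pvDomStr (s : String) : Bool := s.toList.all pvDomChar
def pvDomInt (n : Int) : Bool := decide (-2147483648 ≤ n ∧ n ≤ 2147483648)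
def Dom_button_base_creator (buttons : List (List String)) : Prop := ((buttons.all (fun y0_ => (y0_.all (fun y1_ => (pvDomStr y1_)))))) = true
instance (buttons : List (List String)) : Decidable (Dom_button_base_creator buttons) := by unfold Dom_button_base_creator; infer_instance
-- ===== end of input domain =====

-- B replaces A's online dict-insertion pass by a two-pass scheme (collect distinct
-- letters in first-occurrence order, then build each group by a per-letter scan);
-- objective: alternative decomposition, not faster.

-- ===== PORT A =====

def button_base_creator (buttons : List (List String)) : List (String × List (List String)) :=
  (buttons.foldl (fun d b =>
      b.foldl (fun d l =>
        let d' := if d.contains l then d else d.insert l ([] : List (List String))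
        d'.modify l [] (fun v => v ++ [b])) d)
    PySem.Dict.empty).items

-- ===== PORT B =====
def button_base_creator_alt (buttons : List (List String)) : List (String × List (List String)) :=
  let seen := buttons.foldl (fun s b => b.foldl (fun s l => PySem.Set.add s l) s) ([] : List String)
  seen.map (fun l => (l, buttons.flatMap (fun b => (b.filter (fun c => c == l)).map (fun _ => b))))


-- ===== PRECONDITION & SPEC =====
def Spec_button_base_creator (buttons : List (List String)) (out : List (String × List (List String))) : Prop := out = button_base_creator_alt buttons
instance (buttons : List (List String)) (out : List (String × List (List String))) : Decidable (Spec_button_base_creator buttons out) := by unfold Spec_button_base_creator; infer_instance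

-- ===== CLAIM (what is proved, stated in full; the proofs are below) =====
def Claim_equal_button_base_creator : Prop := ∀ (buttons : List (List String)), Dom_button_base_creator buttons → Spec_button_base_creator buttons (button_base_creator buttons)

-- ===== LEMMAS AND PROOFS =====
-- pvPairs buttons is the flat stream of (letter, button) occurrences both loops traverse
def pvPairs (buttons : List (List String)) : List (String × List String) :=
  buttons.flatMap (fun b => b.map (fun l => (l, b)))

-- step simplification
lemma step_eq (d : PySem.Dict String (List (List String))) (l : String) (b : List String) :
    (let d' := if d.contains l then d else d.insert l ([] : List (List String))
     d'.modify l [] (fun v => v ++ [b])) = d.modify l [] (fun v => v ++ [b]) := by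
  by_cases h : d.contains l
  · simp [h]
  · rw [if_neg h]
    have hm : ∀ (e : PySem.Dict String (List (List String))),
        e.modify l [] (fun v => v ++ [b]) = e.insert l ((e.getD l []) ++ [b]) := fun _ => rfl
    rw [hm, hm, PySem.Dict.getD_insert_self, PySem.Dict.insert_insert_self]
    rw [PySem.Dict.getD_of_not_contains d [] (by simpa using h)]

lemma inner_eq (b : List String) (d : PySem.Dict String (List (List String))) :
    b.foldl (fun d l =>
        let d' := if d.contains l then d else d.insert l ([] : List (List String))
        d'.modify l [] (fun v => v ++ [b])) d
    = (b.map (fun l => (l, b))).foldl (fun d p => d.modify p.1 [] (fun v => v ++ [p.2])) d := by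
  rw [List.foldl_map]
  have hf : (fun (d : PySem.Dict String (List (List String))) (l : String) =>
      let d' := if d.contains l then d else d.insert l ([] : List (List String))
      d'.modify l [] (fun v => v ++ [b]))
      = fun d l => d.modify l [] (fun v => v ++ [b]) :=
    funext fun d => funext fun l => step_eq d l b
  rw [hf]

lemma A_dict_eq (buttons : List (List String)) (d : PySem.Dict String (List (List String))) :
    buttons.foldl (fun d b =>
      b.foldl (fun d l =>
        let d' := if d.contains l then d else d.insert l ([] : List (List String))
        d'.modify l [] (fun v => v ++ [b])) d) d
    = (pvPairs buttons).foldl (fun d p => d.modify p.1 [] (fun v => v ++ [p.2])) d := by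
  induction buttons generalizing d with
  | nil => rfl
  | cons b bs ih =>
    simp only [pvPairs, List.flatMap_cons, List.foldl_append, List.foldl_cons]
    rw [inner_eq, ih]
    rfl


lemma A_items (buttons : List (List String)) :
    button_base_creator buttons =
      (PySem.Set.ofList ((pvPairs buttons).map Prod.fst)).map
        (fun k => (k, ((pvPairs buttons).filter (fun p => p.1 == k)).map Prod.snd)) := by
  unfold button_base_creator
  rw [A_dict_eq]
  have hkeys : ((pvPairs buttons).foldl (fun d p => d.modify p.1 [] (fun v => v ++ [p.2]))
      PySem.Dict.empty).keys = PySem.Set.ofList ((pvPairs buttons).map Prod.fst) := by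
    have h := PySem.Dict.keys_foldl_modify_key (pvPairs buttons) Prod.fst
      ([] : List (List String)) (fun _ p v => v ++ [p.2]) PySem.Dict.empty
    rw [h, PySem.Dict.keys_empty, PySem.Set.update_nil_left]
  have hnodup := PySem.Dict.nodup_keys_foldl_modify_key (pvPairs buttons) Prod.fst
    ([] : List (List String)) (fun _ p v => v ++ [p.2]) PySem.Dict.empty
    PySem.Dict.nodup_keys_empty
  rw [PySem.Dict.items_eq_map_keys _ hnodup [], hkeys]
  apply List.map_congr_left
  intro k _
  rw [PySem.Dict.getD_foldl_modify_append, PySem.Dict.getD_empty, List.nil_append]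

lemma seen_eq (buttons : List (List String)) (s : List String) :
    buttons.foldl (fun s b => b.foldl (fun s l => PySem.Set.add s l) s) s
      = PySem.Set.update s buttons.flatten := by
  induction buttons generalizing s with
  | nil => rfl
  | cons b bs ih =>
    have hb : ∀ (s : List String), b.foldl (fun s l => PySem.Set.add s l) s = PySem.Set.update s b := fun s => rfl
    rw [List.flatten_cons, PySem.Set.update_append, List.foldl_cons, ih, hb]

lemma pairs_fst (buttons : List (List String)) :
    (pvPairs buttons).map Prod.fst = buttons.flatten := by
  simp only [pvPairs, List.map_flatMap, List.map_map]
  have : (fun (a : List String) => List.map (Prod.fst ∘ fun l => (l, a)) a) = fun a => a := by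
    funext a; simp [Function.comp_def]
  rw [this, List.flatMap_id']

lemma group_eq (buttons : List (List String)) (l : String) :
    ((pvPairs buttons).filter (fun p => p.1 == l)).map Prod.snd
      = buttons.flatMap (fun b => (b.filter (fun c => c == l)).map (fun _ => b)) := by
  induction buttons with
  | nil => rfl
  | cons b bs ih =>
    simp only [pvPairs, List.flatMap_cons, List.filter_append, List.map_append] at *
    rw [ih, List.filter_map, List.map_map]
    rfl

theorem main (buttons : List (List String)) :
    button_base_creator buttons = button_base_creator_alt buttons := by
  rw [A_items]
  show _ = (buttons.foldl (fun s b => b.foldl (fun s l => PySem.Set.add s l) s) ([] : List String)).map _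
  rw [seen_eq, pairs_fst, PySem.Set.update_nil_left]
  apply List.map_congr_left
  intro k _
  rw [group_eq]

-- ===== VERDICT (by name: the statement is the Claim_ definition above) =====
theorem button_base_creator_spec : Claim_equal_button_base_creator := by
  intro buttons _
  unfold Spec_button_base_creator
  exact main buttons
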